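-- pv_equiv track=rewrite | github.com/ericsodev/MatrixMultiplier | src/matrix.py | _select_column
-- ===== SOURCE A (Python) =====
-- from typing import Optional, List, Any, Union
--
-- def _select_column(lst: List[List[Any]], col: int) -> Optional[List[Any]]:
--     column = []
--     for row in lst:
--         if len(row) > col:
--             column.append(row[col])
--         else:
--             return None
--     return column
-- ===== SOURCE B (Python) =====
-- def _select_column(lst, col):
--     if all(len(row) > col for row in lst):
--         return [row[col] for row in lst]
--     return None
-- ===== Notes on version B (the rewrite author's own statement) =====
-- stated objective: simpler
-- what changed: Replaces the fused validate-and-append loop (with accumulator and mid-loop early return) by two separate passes: an all() validation check followed by a list comprehension extracting the column.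
import Mathlib
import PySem

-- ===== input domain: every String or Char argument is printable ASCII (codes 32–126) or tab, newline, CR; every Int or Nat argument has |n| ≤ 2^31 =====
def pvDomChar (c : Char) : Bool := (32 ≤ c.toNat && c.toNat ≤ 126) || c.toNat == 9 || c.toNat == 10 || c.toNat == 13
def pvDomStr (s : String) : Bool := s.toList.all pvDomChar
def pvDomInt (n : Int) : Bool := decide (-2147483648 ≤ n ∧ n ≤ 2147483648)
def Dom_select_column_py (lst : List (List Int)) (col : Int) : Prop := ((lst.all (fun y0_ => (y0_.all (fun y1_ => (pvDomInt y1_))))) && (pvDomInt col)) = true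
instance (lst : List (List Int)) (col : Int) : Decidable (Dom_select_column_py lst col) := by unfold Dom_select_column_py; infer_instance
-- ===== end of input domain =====

-- B replaces A's fused validate-and-append loop by two passes: an all() length check, then a comprehension (objective: simpler).

-- ===== PORT A =====
-- the for-loop with accumulator `column`; pyGet? none (= IndexError for negative col on a short row) is excluded by Pre_
def selColLoop (col : Int) : List (List Int) → List Int → Option (List Int)
  | [], column => some column
  | row :: rest, column =>
    if (row.length : Int) > col then
      match PySem.List.pyGet? row col with
      | some v => selColLoop col rest (column ++ [v])
      | none => none        -- IndexError: outside Pre_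
    else none

def select_column_py (lst : List (List Int)) (col : Int) : Option (List Int) :=
  selColLoop col lst []

-- ===== PORT B =====
def select_column_py_alt (lst : List (List Int)) (col : Int) : Option (List Int) :=
  if lst.all (fun row => decide ((row.length : Int) > col)) then
    lst.mapM (fun row => PySem.List.pyGet? row col)   -- the comprehension; pyGet? none (IndexError) outside Pre_
  else none

-- ===== PRECONDITION & SPEC =====
-- Pre_ excludes exactly the inputs where A raises IndexError: a negative col with some row shorter than |col|.
def Pre_select_column_py (lst : List (List Int)) (col : Int) : Prop :=
  0 ≤ col ∨ ∀ row ∈ lst, -col ≤ (row.length : Int)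
instance (lst : List (List Int)) (col : Int) : Decidable (Pre_select_column_py lst col) := by
  unfold Pre_select_column_py; infer_instance
def pvWitness_select_column_py : List (List Int) × Int := ([[1, 2], [3, 4]], 1)

def Spec_select_column_py (lst : List (List Int)) (col : Int) (out : Option (List Int)) : Prop := out = select_column_py_alt lst col
instance (lst : List (List Int)) (col : Int) (out : Option (List Int)) : Decidable (Spec_select_column_py lst col out) := by unfold Spec_select_column_py; infer_instance

-- ===== CLAIM (what is proved, stated in full; the proofs are below) =====
def Claim_equal_select_column_py : Prop := ∀ (lst : List (List Int)) (col : Int), Dom_select_column_py lst col → Pre_select_column_py lst col → Spec_select_column_py lst col (select_column_py lst col)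

-- ===== LEMMAS AND PROOFS =====

-- under Pre_, a row passing the length check has a defined element at col
theorem pyGet?_isSome_of_pre (row : List Int) (col : Int)
    (hlen : (row.length : Int) > col) (hneg : 0 ≤ col ∨ -col ≤ (row.length : Int)) :
    ∃ v, PySem.List.pyGet? row col = some v := by
  have : PySem.List.pyGet? row col ≠ none := by
    intro hn
    rw [PySem.List.pyGet?_eq_none_iff] at hn
    exact hn ⟨by rcases hneg with h | h <;> omega, hlen⟩
  cases h : PySem.List.pyGet? row col with
  | none => exact absurd h this
  | some v => exact ⟨v, rfl⟩

theorem selColLoop_eq (col : Int) (lst : List (List Int)) (acc : List Int)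
    (hpre : 0 ≤ col ∨ ∀ row ∈ lst, -col ≤ (row.length : Int)) :
    selColLoop col lst acc =
      if lst.all (fun row => decide ((row.length : Int) > col)) then
        (lst.mapM (fun row => PySem.List.pyGet? row col)).map (acc ++ ·)
      else none := by
  induction lst generalizing acc with
  | nil => simp [selColLoop]
  | cons row rest ih =>
    have hpre' : 0 ≤ col ∨ ∀ r ∈ rest, -col ≤ (r.length : Int) := by
      rcases hpre with h | h
      · exact Or.inl h
      · exact Or.inr fun r hr => h r (List.mem_cons_of_mem _ hr)
    by_cases hlen : (row.length : Int) > col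
    · obtain ⟨v, hv⟩ := pyGet?_isSome_of_pre row col hlen
        (by rcases hpre with h | h
            · exact Or.inl h
            · exact Or.inr (h row (List.mem_cons_self)))
      rw [show selColLoop col (row :: rest) acc = selColLoop col rest (acc ++ [v]) by
            simp [selColLoop, hlen, hv]]
      rw [ih (acc ++ [v]) hpre']
      simp [List.mapM_cons, hv, hlen]
      split_ifs with hall
      · cases rest.mapM (fun r => PySem.List.pyGet? r col) <;> simp
      · rfl
    · simp [selColLoop, hlen]

-- ===== VERDICT (by name: the statement is the Claim_ definition above) =====
theorem select_column_py_spec : Claim_equal_select_column_py := by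
  intro lst col _ hpre
  unfold Spec_select_column_py select_column_py select_column_py_alt
  rw [selColLoop_eq col lst [] hpre]
  split_ifs with hall
  · cases lst.mapM (fun r => PySem.List.pyGet? r col) <;> simp
  · rfl
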